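-- pv_equiv track=rewrite | github.com/Zedmor/hackerrank-puzzles | advents-of-code/2015/puzzle-5b.py | contains_pair_two_letters
-- ===== SOURCE A (Python) =====
-- from collections import defaultdict
--
-- def contains_pair_two_letters(string):
--     """
--     >>> contains_pair_two_letters('xyxy')
--     True
--     >>> contains_pair_two_letters('aabcdefgaa')
--     True
--     >>> contains_pair_two_letters('aaa')
--     False
--     >>> contains_pair_two_letters('aaaa')
--     True
--     >>> contains_pair_two_letters('xxyxx')
--     True
--     """
--     all_pairs = defaultdict(int)
--     blocked_pairs = defaultdict(int)
--     blocked_pair = ('', -1, -1)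
--     for i in range(len(string) - 1):
--         pair = string[i:i + 2]
--         if pair != blocked_pair[0]:
--             all_pairs[pair] += 1
--         elif i not in blocked_pair[1:]:
--             all_pairs[pair] += 1
--         else:
--             blocked_pairs[pair] += 1
--         blocked_pair = (pair, i, i+1)
--     return len([v for v in all_pairs.values() if v >= 2]) > 0 or len([v for v in blocked_pairs.values() if v >= 2]) > 0
-- ===== SOURCE B (Python) =====
-- def contains_pair_two_letters(string):
--     for i in range(len(string) - 1):
--         if string[i:i + 2] in string[i + 2:]:
--             return True
--     return False
-- ===== Notes on version B (the rewrite author's own statement) =====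
-- stated objective: simpler
-- what changed: Replaces A's single pass that maintains two counting dicts plus blocked-pair bookkeeping with a direct nested search: for each i, test whether the two-char slice at i occurs in the suffix starting at i+2 (which enforces the non-overlap rule), returning on the first hit.
import Mathlib
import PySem

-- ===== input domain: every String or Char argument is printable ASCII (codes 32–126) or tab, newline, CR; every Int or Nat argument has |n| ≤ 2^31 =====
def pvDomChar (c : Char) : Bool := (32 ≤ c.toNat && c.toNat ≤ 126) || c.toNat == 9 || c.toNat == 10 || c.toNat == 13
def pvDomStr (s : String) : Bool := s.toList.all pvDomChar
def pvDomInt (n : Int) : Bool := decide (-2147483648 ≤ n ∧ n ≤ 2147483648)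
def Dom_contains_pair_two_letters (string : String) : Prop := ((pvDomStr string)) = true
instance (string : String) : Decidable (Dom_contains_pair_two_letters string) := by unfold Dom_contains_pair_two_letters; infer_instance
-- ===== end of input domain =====

-- B replaces A's counting-dict single pass by the direct nested substring search (simpler, not faster).

-- ===== PORT A =====
def pvStepA (string : String)
    (st : PySem.Dict String Int × PySem.Dict String Int × (String × Int × Int)) (i : Int) :
    PySem.Dict String Int × PySem.Dict String Int × (String × Int × Int) :=
  let pair := PySem.Str.slice string (some i) (some (i + 2))
  if pair ≠ st.2.2.1 then
    (st.1.insert pair (st.1.getD pair 0 + 1), st.2.1, (pair, i, i + 1))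
  else if i ≠ st.2.2.2.1 ∧ i ≠ st.2.2.2.2 then
    (st.1.insert pair (st.1.getD pair 0 + 1), st.2.1, (pair, i, i + 1))
  else
    (st.1, st.2.1.insert pair (st.2.1.getD pair 0 + 1), (pair, i, i + 1))

def contains_pair_two_letters (string : String) : Bool :=
  let st := (PySem.List.pyRange 0 (PySem.Str.len string - 1) 1).foldl (pvStepA string)
    (PySem.Dict.empty, PySem.Dict.empty, ("", -1, -1))
  decide (0 < (st.1.values.filter (fun v => decide (2 ≤ v))).length)
  || decide (0 < (st.2.1.values.filter (fun v => decide (2 ≤ v))).length)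

-- ===== PORT B =====
def contains_pair_two_letters_alt (string : String) : Bool :=
  (PySem.List.pyRange 0 (PySem.Str.len string - 1) 1).any (fun i =>
    PySem.Str.isIn (PySem.Str.slice string (some i) (some (i + 2)))
                   (PySem.Str.slice string (some (i + 2)) none))

-- ===== PRECONDITION & SPEC =====
def Spec_contains_pair_two_letters (string : String) (out : Bool) : Prop := out = contains_pair_two_letters_alt string
instance (string : String) (out : Bool) : Decidable (Spec_contains_pair_two_letters string out) := by unfold Spec_contains_pair_two_letters; infer_instance

-- ===== CLAIM (what is proved, stated in full; the proofs are below) =====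
def Claim_equal_contains_pair_two_letters : Prop := ∀ (string : String), Dom_contains_pair_two_letters string → Spec_contains_pair_two_letters string (contains_pair_two_letters string)

-- ===== LEMMAS AND PROOFS =====

-- clean model of A's loop: the blocked_pair index bookkeeping collapses to "remember the previous pair"
def pvIns (d : PySem.Dict String Int) (q : String) : PySem.Dict String Int :=
  d.insert q (d.getD q 0 + 1)

def pvStepM (st : PySem.Dict String Int × PySem.Dict String Int × String) (q : String) :
    PySem.Dict String Int × PySem.Dict String Int × String :=
  if q ≠ st.2.2 then (pvIns st.1 q, st.2.1, q) else (st.1, pvIns st.2.1 q, q)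

-- run-start / blocked occurrence sublists
def pvRS : String → List String → List String
  | _, [] => []
  | prev, q :: t => if q ≠ prev then q :: pvRS q t else pvRS q t

def pvBL : String → List String → List String
  | _, [] => []
  | prev, q :: t => if q ≠ prev then pvBL q t else q :: pvBL q t

-- bridge: A's indexed fold with bp = (prev, j-1, j) is the model fold
lemma pvBridge (string : String) (M : Int) :
    ∀ (j : Int) (all blocked : PySem.Dict String Int) (prev : String),
    ((PySem.List.pyRange j M 1).foldl (pvStepA string) (all, blocked, (prev, j - 1, j))).1
        = (((PySem.List.pyRange j M 1).map
              (fun i => PySem.Str.slice string (some i) (some (i + 2)))).foldl pvStepM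
            (all, blocked, prev)).1
    ∧ ((PySem.List.pyRange j M 1).foldl (pvStepA string) (all, blocked, (prev, j - 1, j))).2.1
        = (((PySem.List.pyRange j M 1).map
              (fun i => PySem.Str.slice string (some i) (some (i + 2)))).foldl pvStepM
            (all, blocked, prev)).2.1 := by
  have main : ∀ (n : Nat) (j : Int), (M - j).toNat = n →
      ∀ (all blocked : PySem.Dict String Int) (prev : String),
      ((PySem.List.pyRange j M 1).foldl (pvStepA string) (all, blocked, (prev, j - 1, j)))
        = (let m := (((PySem.List.pyRange j M 1).map
              (fun i => PySem.Str.slice string (some i) (some (i + 2)))).foldl pvStepM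
            (all, blocked, prev));
           (m.1, m.2.1, (m.2.2, M - 1, M))) ∨ M ≤ j := by
    intro n
    induction n with
    | zero =>
      intro j hj all blocked prev
      right; omega
    | succ n ihn =>
      intro j hj all blocked prev
      left
      rw [PySem.List.pyRange_one_cons (by omega)]
      simp only [List.foldl_cons, List.map_cons]
      have hstep : pvStepA string (all, blocked, (prev, j - 1, j)) j
          = (let pair := PySem.Str.slice string (some j) (some (j + 2));
             if pair ≠ prev then (pvIns all pair, blocked, (pair, (j + 1) - 1, j + 1))
             else (all, pvIns blocked pair, (pair, (j + 1) - 1, j + 1))) := by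
        simp only [pvStepA, pvIns]
        by_cases hp : PySem.Str.slice string (some j) (some (j + 2)) = prev
        · rw [if_neg (by simp [hp]), if_neg (by simp), if_neg (by simp [hp])]
          norm_num
        · rw [if_pos (by simpa using hp), if_pos (by simpa using hp)]
          norm_num
      rw [hstep]
      by_cases hp : PySem.Str.slice string (some j) (some (j + 2)) = prev
      · rw [hp, if_neg (by simp)]
        rcases ihn (j + 1) (by omega) all (pvIns blocked prev) prev with h | h
        · rw [h]; simp [pvStepM]
        · rcases (lt_or_ge j M) with h2 | h2
          · -- range (j+1) M empty only if M ≤ j+1, i.e. M = j+1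
            rw [PySem.List.pyRange_one_eq_nil (by omega)]
            simp only [List.foldl_nil, List.map_nil]
            have : M - 1 = j := by omega
            simp [pvStepM, this]
            omega
          · omega
      · rw [if_pos hp]
        rcases ihn (j + 1) (by omega) (pvIns all (PySem.Str.slice string (some j) (some (j + 2)))) blocked (PySem.Str.slice string (some j) (some (j + 2))) with h | h
        · rw [h]; simp [pvStepM, hp]
        · rcases (lt_or_ge j M) with h2 | h2
          · rw [PySem.List.pyRange_one_eq_nil (by omega)]
            simp only [List.foldl_nil, List.map_nil]
            have : M - 1 = j := by omega
            simp [pvStepM, hp, this]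
            omega
          · omega
  intro j all blocked prev
  rcases main (M - j).toNat j rfl all blocked prev with h | h
  · rw [h]; exact ⟨rfl, rfl⟩
  · rw [PySem.List.pyRange_one_eq_nil (by omega)]
    simp

-- model fold splits into the two sublist folds
lemma pvModelSplit :
    ∀ (Q : List String) (all blocked : PySem.Dict String Int) (prev : String),
    (Q.foldl pvStepM (all, blocked, prev)).1 = (pvRS prev Q).foldl pvIns all
    ∧ (Q.foldl pvStepM (all, blocked, prev)).2.1 = (pvBL prev Q).foldl pvIns blocked := by
  intro Q
  induction Q with
  | nil => intro all blocked prev; simp [pvRS, pvBL]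
  | cons q t ih =>
    intro all blocked prev
    by_cases h : q = prev
    · simpa [pvStepM, pvRS, pvBL, h] using ih all (pvIns blocked q) q
    · simpa [pvStepM, pvRS, pvBL, h] using ih (pvIns all q) blocked q

-- the "any dict value ≥ 2" test on a counter
lemma pvValuesTest (xs : List String) :
    (0 < (((xs.foldl pvIns PySem.Dict.empty).values.filter
        (fun v => decide (2 ≤ v))).length)) ↔ ∃ p, 2 ≤ xs.count p := by
  have h1 : xs.foldl pvIns PySem.Dict.empty = PySem.Dict.counter xs := by
    rw [← PySem.Dict.foldl_insert_getD_add_one_eq_counter]; rfl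
  have h2 : (PySem.Dict.counter xs).values
      = (PySem.Set.ofList xs).map (fun k => (xs.count k : Int)) := by
    show ((PySem.Dict.counter xs).items.map (·.2)) = _
    rw [PySem.Dict.items_counter]
    simp
  rw [h1, h2, List.length_filter_pos_iff]
  constructor
  · rintro ⟨v, hv, h2v⟩
    obtain ⟨k, hk, rfl⟩ := List.mem_map.mp hv
    exact ⟨k, by simpa using h2v⟩
  · rintro ⟨p, hp⟩
    refine ⟨(xs.count p : Int), List.mem_map.mpr ⟨p, ?_, rfl⟩, by simpa using hp⟩
    exact (PySem.Set.mem_ofList xs p).mpr (List.count_pos_iff.mp (by omega))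

-- zip characterisations of pvRS / pvBL
lemma pvRS_eq : ∀ (Q : List String) (prev : String),
    pvRS prev Q = ((Q.zip (prev :: Q)).filter (fun x => decide (x.1 ≠ x.2))).map (·.1) := by
  intro Q
  induction Q with
  | nil => intro prev; simp [pvRS]
  | cons q t ih =>
    intro prev
    by_cases h : q = prev
    · subst h; simpa [pvRS, List.zip_cons_cons] using ih q
    · simp [pvRS, List.zip_cons_cons, h, ih q]

lemma pvBL_eq : ∀ (Q : List String) (prev : String),
    pvBL prev Q = ((Q.zip (prev :: Q)).filter (fun x => decide (x.1 = x.2))).map (·.1) := by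
  intro Q
  induction Q with
  | nil => intro prev; simp [pvBL]
  | cons q t ih =>
    intro prev
    by_cases h : q = prev
    · subst h; simpa [pvBL, List.zip_cons_cons] using ih q
    · simp [pvBL, List.zip_cons_cons, h, ih q]

-- two occurrences in a countP
lemma pvTwoCountP {α : Type} (pred : α → Bool) :
    ∀ (l : List α), 2 ≤ l.countP pred ↔
      ∃ (i j : Nat), i < j ∧ ∃ (hi : i < l.length) (hj : j < l.length), pred l[i] ∧ pred l[j] := by
  intro l
  induction l with
  | nil => simp
  | cons x t ih =>
    rw [List.countP_cons]
    by_cases hx : pred x = true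
    · simp only [hx, if_true]
      constructor
      · intro h
        have h1 : 0 < t.countP pred := by omega
        obtain ⟨a, ha, hpa⟩ := List.countP_pos_iff.mp h1
        obtain ⟨k, hk, rfl⟩ := List.mem_iff_getElem.mp ha
        exact ⟨0, k + 1, by omega, by simp, by simpa using hk,
          by simpa using hx, by simpa using hpa⟩
      · rintro ⟨i, j, hij, hi, hj, hpi, hpj⟩
        have h1 : 0 < t.countP pred := by
          apply List.countP_pos_iff.mpr
          refine ⟨t[j - 1]'(by simp at hj; omega), List.getElem_mem _, ?_⟩
          have : (x :: t)[j] = t[j - 1]'(by simp at hj; omega) := by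
            rcases j with _ | j'
            · omega
            · simp
          rwa [this] at hpj
        omega
    · simp only [hx, Bool.false_eq_true, if_false, Nat.add_zero]
      rw [ih]
      constructor
      · rintro ⟨i, j, hij, hi, hj, hpi, hpj⟩
        exact ⟨i + 1, j + 1, by omega, by simpa using hi, by simpa using hj,
          by simpa using hpi, by simpa using hpj⟩
      · rintro ⟨i, j, hij, hi, hj, hpi, hpj⟩
        rcases i with _ | i'
        · simp at hpi; exact absurd hpi (by simpa using hx)
        · rcases j with _ | j'
          · omega
          · exact ⟨i', j', by omega, by simp at hi; omega, by simp at hj; omega,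
              by simpa using hpi, by simpa using hpj⟩

-- count-through-zip: two flagged occurrences of p, by position
lemma pvCountIdx (Q : List String) (prev p : String) (c : String → String → Bool) :
    2 ≤ ((((Q.zip (prev :: Q)).filter (fun x => c x.1 x.2)).map (·.1)).count p) ↔
    ∃ (i j : Nat), i < j ∧ ∃ (hi : i < Q.length) (hj : j < Q.length),
      (Q[i] = p ∧ c Q[i] ((prev :: Q)[i]'(by simp; omega)) = true) ∧
      (Q[j] = p ∧ c Q[j] ((prev :: Q)[j]'(by simp; omega)) = true) := by
  have hlen : (Q.zip (prev :: Q)).length = Q.length := by simp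
  rw [List.count_eq_countP, List.countP_map, List.countP_filter, pvTwoCountP]
  have hD : ∀ (k : Nat) (hk : k < Q.length),
      (Q.zip (prev :: Q))[k]'(by omega) = (Q[k], (prev :: Q)[k]'(by simp; omega)) := by
    intro k hk
    exact List.getElem_zip
  constructor
  · rintro ⟨i, j, hij, hi, hj, h1, h2⟩
    rw [hlen] at hi hj
    rw [hD i hi] at h1
    rw [hD j hj] at h2
    simp only [Function.comp_apply, Bool.and_eq_true, beq_iff_eq] at h1 h2
    exact ⟨i, j, hij, hi, hj, ⟨h1.1, h1.2⟩, ⟨h2.1, h2.2⟩⟩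
  · rintro ⟨i, j, hij, hi, hj, ⟨h1p, h1c⟩, ⟨h2p, h2c⟩⟩
    refine ⟨i, j, hij, by omega, by omega, ?_, ?_⟩
    · rw [hD i hi]
      simp only [Function.comp_apply, Bool.and_eq_true, beq_iff_eq]
      exact ⟨h1p, h1c⟩
    · rw [hD j hj]
      simp only [Function.comp_apply, Bool.and_eq_true, beq_iff_eq]
      exact ⟨h2p, h2c⟩

-- core combinatorial equivalence, for an arbitrary list of pairs
lemma pvCore (Q : List String) (prev : String) (h0 : prev ∉ Q) :
    ((∃ p, 2 ≤ (pvRS prev Q).count p) ∨ (∃ p, 2 ≤ (pvBL prev Q).count p)) ↔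
      ∃ (i j : Nat), i + 2 ≤ j ∧ ∃ (hi : i < Q.length) (hj : j < Q.length), Q[i] = Q[j] := by
  have hpre : ∀ (k : Nat) (hk0 : 0 < k) (hk : k < Q.length),
      (prev :: Q)[k]'(by simp; omega) = Q[k - 1]'(by omega) := by
    intro k hk0 hk
    rcases k with _ | k'
    · omega
    · simp
  have hpre0 : ∀ (h : 0 < Q.length), (prev :: Q)[0] = prev := by intro h; rfl
  have hQ0 : ∀ (h0' : 0 < Q.length), Q[0] ≠ prev := by
    intro h0' he
    exact h0 (he ▸ List.getElem_mem h0')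
  rw [pvRS_eq, pvBL_eq]
  constructor
  · rintro (⟨p, hp⟩ | ⟨p, hp⟩)
    · -- two run-start occurrences: they cannot be adjacent
      obtain ⟨i, j, hij, hi, hj, ⟨hip, hic⟩, ⟨hjp, hjc⟩⟩ := (pvCountIdx Q prev p (fun a b => decide (a ≠ b))).mp hp
      simp only [decide_eq_true_eq] at hic hjc
      refine ⟨i, j, ?_, hi, hj, by rw [hip, hjp]⟩
      by_contra hlt
      have hj1 : j = i + 1 := by omega
      subst hj1
      apply hjc
      rw [hpre (i + 1) (by omega) hj, hjp]
      simpa using hip.symm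
    · -- two blocked occurrences
      obtain ⟨i, j, hij, hi, hj, ⟨hip, hic⟩, ⟨hjp, hjc⟩⟩ := (pvCountIdx Q prev p (fun a b => decide (a = b))).mp hp
      simp only [decide_eq_true_eq] at hic hjc
      have hi0 : 0 < i := by
        rcases Nat.eq_zero_or_pos i with h | h
        · subst h
          simp only [List.getElem_cons_zero] at hic
          exact absurd hic (hQ0 (by omega))
        · exact h
      have hj0 : 0 < j := by omega
      have hiprev : Q[i - 1]'(by omega) = p := by
        rw [← hpre i hi0 hi, ← hic, hip]
      rcases Nat.lt_or_ge (i + 1) j with h2 | h2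
      · exact ⟨i, j, by omega, hi, hj, by rw [hip, hjp]⟩
      · -- j = i + 1: use positions i-1 and j
        have : j = i + 1 := by omega
        exact ⟨i - 1, j, by omega, by omega, hj, by rw [hiprev, hjp]⟩
  · rintro ⟨i, j, hij, hi, hj, hQij⟩
    set p := Q[j] with hpdef
    have hip : Q[i] = p := hQij
    -- case split on whether i / j are run starts
    by_cases hri : Q[i] = (prev :: Q)[i]'(by simp; omega)
    · -- i blocked ⇒ i ≥ 1 and Q[i-1] = p
      have hi0 : 0 < i := by
        rcases Nat.eq_zero_or_pos i with h | h
        · exfalso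
          subst h
          simp only [List.getElem_cons_zero] at hri
          exact hQ0 (by omega) hri
        · exact h
      have hiprev : Q[i - 1]'(by omega) = p := by
        rw [← hpre i hi0 hi, ← hri, hip]
      by_cases hri' : Q[i - 1]'(by omega) = (prev :: Q)[i - 1]'(by simp; omega)
      · -- i-1 also blocked: two blocked occurrences (i-1, i)
        right
        refine ⟨p, (pvCountIdx Q prev p (fun a b => decide (a = b))).mpr ⟨i - 1, i, by omega, by omega, hi, ?_, ?_⟩⟩
        · exact ⟨hiprev, by simpa using hri'⟩
        · exact ⟨hip, by simpa using hri⟩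
      · -- i-1 is a run start; is j a run start?
        by_cases hrj : Q[j] = (prev :: Q)[j]'(by simp; omega)
        · -- j blocked ⇒ j-1 occurrence
          have hjprev : Q[j - 1]'(by omega) = p := by
            rw [← hpre j (by omega) hj, ← hrj]
          by_cases hrj' : Q[j - 1]'(by omega) = (prev :: Q)[j - 1]'(by simp; omega)
          · right
            refine ⟨p, (pvCountIdx Q prev p (fun a b => decide (a = b))).mpr ⟨j - 1, j, by omega, by omega, hj, ?_, ?_⟩⟩
            · exact ⟨hjprev, by simpa using hrj'⟩
            · exact ⟨rfl, by simpa using hrj⟩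
          · left
            refine ⟨p, (pvCountIdx Q prev p (fun a b => decide (a ≠ b))).mpr ⟨i - 1, j - 1, by omega, by omega, by omega, ?_, ?_⟩⟩
            · exact ⟨hiprev, by simpa using hri'⟩
            · exact ⟨hjprev, by simpa using hrj'⟩
        · left
          refine ⟨p, (pvCountIdx Q prev p (fun a b => decide (a ≠ b))).mpr ⟨i - 1, j, by omega, by omega, hj, ?_, ?_⟩⟩
          · exact ⟨hiprev, by simpa using hri'⟩
          · exact ⟨rfl, by simpa using hrj⟩
    · -- i is a run start
      by_cases hrj : Q[j] = (prev :: Q)[j]'(by simp; omega)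
      · -- j blocked: look at j-1
        have hjprev : Q[j - 1]'(by omega) = p := by
          rw [← hpre j (by omega) hj, ← hrj]
        by_cases hrj' : Q[j - 1]'(by omega) = (prev :: Q)[j - 1]'(by simp; omega)
        · right
          refine ⟨p, (pvCountIdx Q prev p (fun a b => decide (a = b))).mpr ⟨j - 1, j, by omega, by omega, hj, ?_, ?_⟩⟩
          · exact ⟨hjprev, by simpa using hrj'⟩
          · exact ⟨rfl, by simpa using hrj⟩
        · left
          refine ⟨p, (pvCountIdx Q prev p (fun a b => decide (a ≠ b))).mpr ⟨i, j - 1, by omega, hi, by omega, ?_, ?_⟩⟩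
          · exact ⟨hip, by simpa using hri⟩
          · exact ⟨hjprev, by simpa using hrj'⟩
      · left
        refine ⟨p, (pvCountIdx Q prev p (fun a b => decide (a ≠ b))).mpr ⟨i, j, by omega, hi, hj, ?_, ?_⟩⟩
        · exact ⟨hip, by simpa using hri⟩
        · exact ⟨rfl, by simpa using hrj⟩

-- B-side characterisation
lemma pvAltIff (string : String) :
    contains_pair_two_letters_alt string = true ↔
      ∃ (i j : Nat), i + 2 ≤ j ∧ j + 1 < string.toList.length ∧
        (string.toList.drop i).take 2 = (string.toList.drop j).take 2 := by
  unfold contains_pair_two_letters_alt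
  rw [List.any_eq_true]
  have hlen : PySem.Str.len string = (string.toList.length : Int) := by simp
  have hsub : ∀ (i : Int), 0 ≤ i → (PySem.Str.slice string (some i) (some (i + 2))).toList
      = (string.toList.drop i.toNat).take 2 := by
    intro i h0
    rw [PySem.Str.toList_slice, PySem.Chars.slice_eq_listSlice,
      PySem.List.slice_toNat _ h0 (by omega)]
    congr 1
    omega
  have hsuf : ∀ (i : Int), 0 ≤ i → (PySem.Str.slice string (some (i + 2)) none).toList
      = string.toList.drop (i.toNat + 2) := by
    intro i h0
    rw [PySem.Str.toList_slice, PySem.Chars.slice_eq_listSlice,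
      PySem.List.slice_from _ (by omega)]
    congr 1
    omega
  constructor
  · rintro ⟨i, hmem, hcond⟩
    rw [PySem.List.mem_pyRange_one, hlen] at hmem
    obtain ⟨h0, hlt⟩ := hmem
    set cs := string.toList with hcs
    rw [PySem.Str.isIn_iff_infix, hsub i h0, hsuf i h0] at hcond
    obtain ⟨k, hpre⟩ := (PySem.Chars.exists_prefix_drop_iff_isIn _ _).mpr
      ((PySem.Chars.isIn_iff_infix _ _).mpr hcond)
    rw [List.drop_drop] at hpre
    have hl2 : ((cs.drop i.toNat).take 2).length = 2 := by
      simp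
      omega
    have heq := List.prefix_iff_eq_take.mp hpre
    rw [hl2] at heq
    have hJ : (i.toNat + 2 + k) + 1 < cs.length := by
      have := congrArg List.length heq
      simp at this
      omega
    exact ⟨i.toNat, i.toNat + 2 + k, by omega, hJ, heq⟩
  · rintro ⟨i, j, hij, hjlt, heq⟩
    refine ⟨(i : Int), ?_, ?_⟩
    · rw [PySem.List.mem_pyRange_one, hlen]
      exact ⟨by positivity, by omega⟩
    · rw [PySem.Str.isIn_iff_infix, hsub _ (by positivity), hsuf _ (by positivity)]
      rw [← PySem.Chars.isIn_iff_infix]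
      apply (PySem.Chars.exists_prefix_drop_iff_isIn _ _).mp
      refine ⟨j - (i + 2), ?_⟩
      rw [List.drop_drop]
      simp only [Int.toNat_natCast]
      have h2 : i + 2 + (j - (i + 2)) = j := by omega
      rw [h2, List.prefix_iff_eq_take]
      have hl2 : ((string.toList.drop i).take 2).length = 2 := by
        have hj' : j + 1 < string.length := by simpa using hjlt
        simp
        omega
      rw [hl2, heq]

-- A-side characterisation
lemma pvAIff (string : String) :
    contains_pair_two_letters string = true ↔
      ∃ (i j : Nat), i + 2 ≤ j ∧ j + 1 < string.toList.length ∧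
        (string.toList.drop i).take 2 = (string.toList.drop j).take 2 := by
  unfold contains_pair_two_letters
  rw [Bool.or_eq_true, decide_eq_true_iff, decide_eq_true_iff]
  have hlen : PySem.Str.len string = (string.toList.length : Int) := by simp
  have hsub : ∀ (i : Int), 0 ≤ i → (PySem.Str.slice string (some i) (some (i + 2))).toList
      = (string.toList.drop i.toNat).take 2 := by
    intro i h0
    rw [PySem.Str.toList_slice, PySem.Chars.slice_eq_listSlice,
      PySem.List.slice_toNat _ h0 (by omega)]
    congr 1
    omega
  by_cases hM : PySem.Str.len string - 1 ≤ 0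
  · rw [PySem.List.pyRange_one_eq_nil hM]
    rw [hlen] at hM
    simp only [List.foldl_nil]
    have hve : (PySem.Dict.empty : PySem.Dict String Int).values = [] := rfl
    constructor
    · intro h
      simp [hve] at h
    · rintro ⟨i, j, hij, hjlt, -⟩
      omega
  · rw [not_le] at hM
    rw [PySem.List.pyRange_one_cons (by omega)]
    simp only [List.foldl_cons]
    set cs := string.toList with hcs
    have hcs2 : 2 ≤ cs.length := by rw [hlen] at hM; omega
    set pair0 := PySem.Str.slice string (some 0) (some (0 + 2)) with hp0
    have hp0l : pair0.toList = cs.take 2 := by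
      rw [hp0, hsub 0 le_rfl]
      simp
    have hp0ne : pair0 ≠ "" := by
      intro h
      have h2 : pair0.toList.length = 0 := by rw [h]; rfl
      rw [hp0l, List.length_take] at h2
      omega
    have hstep0 : pvStepA string (PySem.Dict.empty, PySem.Dict.empty, ("", -1, -1)) 0
        = (pvIns PySem.Dict.empty pair0, PySem.Dict.empty, (pair0, 0, 0 + 1)) := by
      simp only [pvStepA, pvIns]
      rw [if_pos (by simpa using hp0ne)]
    rw [hstep0, show (0:Int) + 1 = 1 by norm_num]
    have hb := pvBridge string (PySem.Str.len string - 1) 1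
      (pvIns PySem.Dict.empty pair0) PySem.Dict.empty pair0
    simp only [show (1:Int) - 1 = 0 by norm_num] at hb
    rw [hb.1, hb.2]
    have hfull : ∀ (Qs' : List String),
        List.foldl pvStepM (pvIns PySem.Dict.empty pair0, PySem.Dict.empty, pair0) Qs'
          = List.foldl pvStepM (PySem.Dict.empty, PySem.Dict.empty, "") (pair0 :: Qs') := by
      intro Qs'
      rw [List.foldl_cons]
      congr 1
      simp only [pvStepM]
      rw [if_pos (by simpa using hp0ne)]
    rw [hfull]
    have hQs : pair0 :: (PySem.List.pyRange 1 (PySem.Str.len string - 1) 1).map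
          (fun i => PySem.Str.slice string (some i) (some (i + 2)))
        = (PySem.List.pyRange 0 (PySem.Str.len string - 1) 1).map
          (fun i => PySem.Str.slice string (some i) (some (i + 2))) := by
      rw [PySem.List.pyRange_one_cons (show (0:Int) < PySem.Str.len string - 1 from hM), List.map_cons]
      rw [hp0]
      norm_num
    rw [hQs]
    set Qs := (PySem.List.pyRange 0 (PySem.Str.len string - 1) 1).map
      (fun i => PySem.Str.slice string (some i) (some (i + 2))) with hQsdef
    rw [(pvModelSplit Qs PySem.Dict.empty PySem.Dict.empty "").1,
      (pvModelSplit Qs PySem.Dict.empty PySem.Dict.empty "").2]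
    rw [pvValuesTest, pvValuesTest]
    -- facts about Qs
    have h3 : string.length = cs.length := by rw [hcs]; simp
    have hQlen : Qs.length = cs.length - 1 := by
      rw [hQsdef]
      simp [PySem.List.length_pyRange_one]
      omega
    have hQget : ∀ (k : Nat) (hk : k < Qs.length), Qs[k] = PySem.Str.slice string (some (k : Int)) (some ((k : Int) + 2)) := by
      intro k hk
      simp only [hQsdef, List.getElem_map, PySem.List.getElem_pyRange_one]
      norm_num
    have hQtl : ∀ (k : Nat) (hk : k < Qs.length), (Qs[k]).toList = (cs.drop k).take 2 := by
      intro k hk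
      rw [hQget k hk, hsub _ (by positivity)]
      simp
    have h0 : "" ∉ Qs := by
      intro hmem
      obtain ⟨k, hk, hke⟩ := List.mem_iff_getElem.mp hmem
      have h2 : (Qs[k]).toList.length = 0 := by rw [hke]; rfl
      rw [hQtl k hk] at h2
      simp at h2
      rw [hQlen] at hk
      omega
    rw [pvCore Qs "" h0]
    constructor
    · rintro ⟨i, j, hij, hi, hj, hQeq⟩
      refine ⟨i, j, hij, by omega, ?_⟩
      have := congrArg String.toList hQeq
      rwa [hQtl i hi, hQtl j hj] at this
    · rintro ⟨i, j, hij, hjlt, heq⟩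
      have hj : j < Qs.length := by omega
      refine ⟨i, j, hij, by omega, hj, ?_⟩
      apply String.toList_inj.mp
      rw [hQtl i (by omega), hQtl j hj]
      exact heq

-- ===== VERDICT (by name: the statement is the Claim_ definition above) =====
theorem contains_pair_two_letters_spec : Claim_equal_contains_pair_two_letters := by
  intro string _
  unfold Spec_contains_pair_two_letters
  exact Bool.eq_iff_iff.mpr ((pvAIff string).trans (pvAltIff string).symm)
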